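-- pv_equiv track=rewrite | github.com/zibochen6/jetson-deployment-agent | jetson-deployment-agent/scripts/analyze_compatibility.py | detect_required_models
-- ===== SOURCE A (Python) =====
-- def detect_required_models(hardware_requirements: list[str]) -> list[str]:
--     known_models = [
--         "jetson nano",
--         "jetson xavier nx",
--         "jetson agx xavier",
--         "jetson orin nano",
--         "jetson orin nx",
--         "jetson agx orin",
--         "jetson tx2",
--     ]
--     found: list[str] = []
--     for line in hardware_requirements:
--         lowered = line.lower()
--         for model in known_models:
--             if model in lowered and model not in found:
--                 found.append(model)
--     return found
-- ===== SOURCE B (Python) =====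
-- def detect_required_models(hardware_requirements: list[str]) -> list[str]:
--     known_models = [
--         "jetson nano",
--         "jetson xavier nx",
--         "jetson agx xavier",
--         "jetson orin nano",
--         "jetson orin nx",
--         "jetson agx orin",
--         "jetson tx2",
--     ]
--     lowered = [line.lower() for line in hardware_requirements]
--     hits = []
--     for j, model in enumerate(known_models):
--         first = next((i for i, line in enumerate(lowered) if model in line), None)
--         if first is not None:
--             hits.append((first, j, model))
--     hits.sort(key=lambda t: (t[0], t[1]))
--     return [model for _, _, model in hits]
-- ===== Notes on version B (the rewrite author's own statement) =====
-- stated objective: alternative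
-- what changed: Replaces A's incremental line-by-line appending with a membership scan per candidate ('model not in found') by an index table: lowercase all lines once, compute each model's first matching line index, then sort the (first_index, model_position) tuples and emit the models in that order.
import Mathlib
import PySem

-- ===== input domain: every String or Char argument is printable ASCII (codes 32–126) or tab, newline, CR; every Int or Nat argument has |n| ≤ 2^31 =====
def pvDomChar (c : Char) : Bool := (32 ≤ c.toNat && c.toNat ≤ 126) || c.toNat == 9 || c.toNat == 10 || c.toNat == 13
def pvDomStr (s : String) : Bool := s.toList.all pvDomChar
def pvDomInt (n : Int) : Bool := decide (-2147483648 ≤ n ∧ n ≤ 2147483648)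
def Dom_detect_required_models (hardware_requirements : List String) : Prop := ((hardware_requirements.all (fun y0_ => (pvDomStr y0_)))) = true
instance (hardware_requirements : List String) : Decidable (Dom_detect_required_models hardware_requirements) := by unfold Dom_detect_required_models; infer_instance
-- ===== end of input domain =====

-- B replaces A's incremental first-occurrence appending by an index-table-then-sort pass
-- (first matching line index per model, sorted by (line index, model position)); same cost, different decomposition.

def pvKnownModels : List String :=
  ["jetson nano", "jetson xavier nx", "jetson agx xavier", "jetson orin nano",
   "jetson orin nx", "jetson agx orin", "jetson tx2"]

-- ===== PORT A =====
def detect_required_models (hardware_requirements : List String) : List String :=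
  hardware_requirements.foldl (fun found line =>
    let lowered := PySem.Str.lower line
    pvKnownModels.foldl (fun found model =>
      if PySem.Str.isIn model lowered && !found.contains model then found ++ [model] else found)
      found) []

-- ===== PORT B =====
-- next((i for i, line in enumerate(lowered) if model in line), None)
def pvFirstHit (lowered : List String) (model : String) : Option Int :=
  ((PySem.List.enumerate lowered 0).find? (fun q => PySem.Str.isIn model q.2)).map (·.1)

def detect_required_models_alt (hardware_requirements : List String) : List String :=
  let lowered := hardware_requirements.map PySem.Str.lower
  let hits := (PySem.List.enumerate pvKnownModels 0).foldl (fun hits p =>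
      match pvFirstHit lowered p.2 with
      | some first => hits ++ [(first, p.1, p.2)]
      | none => hits) ([] : List (Int × Int × String))
  (PySem.List.sorted2 hits (fun t => t.1) (fun t => t.2.1)).map (fun t => t.2.2)

-- ===== PRECONDITION & SPEC =====
def Spec_detect_required_models (hardware_requirements : List String) (out : List String) : Prop := out = detect_required_models_alt hardware_requirements
instance (hardware_requirements : List String) (out : List String) : Decidable (Spec_detect_required_models hardware_requirements out) := by unfold Spec_detect_required_models; infer_instance

-- ===== CLAIM (what is proved, stated in full; the proofs are below) =====
def Claim_equal_detect_required_models : Prop := ∀ (hardware_requirements : List String), Dom_detect_required_models hardware_requirements → Spec_detect_required_models hardware_requirements (detect_required_models hardware_requirements)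

-- ===== LEMMAS AND PROOFS =====

-- the tuple B records for one (position, model) pair, given the lowered lines
def pvTupOf (lowered : List String) (p : Int × String) : Option (Int × Int × String) :=
  (pvFirstHit lowered p.2).map (fun i => (i, p.1, p.2))

def pvTuples (hw : List String) : List (Int × Int × String) :=
  (PySem.List.enumerate pvKnownModels 0).filterMap (pvTupOf (hw.map PySem.Str.lower))

def pvKey (t : Int × Int × String) : Int ×ₗ Int := toLex (t.1, t.2.1)

-- "some line of hw contains m (after lowering)"
def pvFoundB (hw : List String) (m : String) : Bool :=
  (hw.map PySem.Str.lower).any (fun line => PySem.Str.isIn m line)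

lemma pvFindEnum_isSome (p : String → Bool) :
    ∀ (lowered : List String) (s : Int),
      ((PySem.List.enumerate lowered s).find? (fun q => p q.2)).isSome = lowered.any p := by
  intro lowered
  induction lowered with
  | nil => intro s; simp [PySem.List.enumerate_nil]
  | cons x xs ih =>
      intro s
      rw [PySem.List.enumerate_cons, List.find?_cons]
      by_cases h : p x = true
      · simp [h]
      · simp only [h, List.any_cons]
        simp [ih]

lemma pvFirstHit_isSome (lowered : List String) (m : String) :
    (pvFirstHit lowered m).isSome = lowered.any (fun line => PySem.Str.isIn m line) := by
  rw [pvFirstHit, Option.isSome_map]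
  exact pvFindEnum_isSome (fun line => PySem.Str.isIn m line) lowered 0

-- B's accumulation loop is a filterMap
lemma pvAltHits (lowered : List String) :
    ∀ (l : List (Int × String)) (acc : List (Int × Int × String)),
      l.foldl (fun hits p =>
        match pvFirstHit lowered p.2 with
        | some first => hits ++ [(first, p.1, p.2)]
        | none => hits) acc = acc ++ l.filterMap (pvTupOf lowered) := by
  intro l
  induction l with
  | nil => intro acc; simp
  | cons p t ih =>
      intro acc
      rw [List.foldl_cons, List.filterMap_cons]
      cases h : pvFirstHit lowered p.2 with
      | none => simp [pvTupOf, h, ih]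
      | some i => simp [pvTupOf, h, ih]

-- sorted2 with keys t.1, t.2.1 is sorted with the lexicographic key pvKey
lemma pvSorted2_eq_sorted (xs : List (Int × Int × String)) :
    PySem.List.sorted2 xs (fun t => t.1) (fun t => t.2.1) = PySem.List.sorted xs pvKey := by
  rw [PySem.List.sorted_eq_foldl_insertBy]
  have hbef : (fun (a b : Int × Int × String) =>
        (decide (a.1 < b.1) || (!decide (b.1 < a.1) && decide (a.2.1 < b.2.1))))
      = fun a b => decide (pvKey a < pvKey b) := by
    funext a b
    simp only [pvKey, Prod.Lex.toLex_lt_toLex]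
    rcases lt_trichotomy a.1 b.1 with h | h | h
    · simp [h]
    · simp [h]
    · have h1 : decide (a.1 < b.1) = false := by simp [lt_asymm h]
      have h2 : decide (b.1 < a.1) = true := by simp [h]
      have h3 : decide (a.1 < b.1 ∨ a.1 = b.1 ∧ a.2.1 < b.2.1) = false := by
        simp only [decide_eq_false_iff_not, not_or, not_and]
        exact ⟨lt_asymm h, fun he => absurd he (by omega)⟩
      simp only [h1, h2, h3, Bool.not_true, Bool.false_and, Bool.false_or]
  show List.foldl (fun acc x => PySem.List.insertBy
      (fun a b => (decide (a.1 < b.1) || (!decide (b.1 < a.1) && decide (a.2.1 < b.2.1)))) x acc) [] xs = _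
  rw [hbef]

-- A's inner loop over the (duplicate-free) model list
lemma pvInner (lowered : String) :
    ∀ (known : List String), known.Nodup → ∀ (found0 : List String),
      known.foldl (fun found model =>
        if PySem.Str.isIn model lowered && !found.contains model then found ++ [model] else found)
        found0
      = found0 ++ known.filter (fun m => PySem.Str.isIn m lowered && !found0.contains m) := by
  intro known
  induction known with
  | nil => intro _ found0; simp
  | cons m t ih =>
      intro hnd found0
      have hndt : t.Nodup := (List.nodup_cons.mp hnd).2
      have hm : m ∉ t := (List.nodup_cons.mp hnd).1
      rw [List.foldl_cons, List.filter_cons]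
      by_cases hc : (PySem.Str.isIn m lowered && !found0.contains m) = true
      · rw [if_pos hc, if_pos hc, ih hndt]
        have : t.filter (fun x => PySem.Str.isIn x lowered && !(found0 ++ [m]).contains x)
             = t.filter (fun x => PySem.Str.isIn x lowered && !found0.contains x) := by
          apply List.filter_congr
          intro x hx
          have hxm : x ≠ m := fun h => hm (h ▸ hx)
          simp [hxm]
        rw [this]
        simp
      · rw [if_neg hc, if_neg hc, ih hndt]

-- filterMap of an 'or' of disjoint option maps splits into a permutation of the two parts
lemma pvFilterMap_or_perm {α β : Type} (f g : α → Option β)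
    (h : ∀ x, (f x).isSome → g x = none) :
    ∀ (l : List α), (l.filterMap (fun x => (f x).or (g x))).Perm (l.filterMap f ++ l.filterMap g) := by
  intro l
  induction l with
  | nil => simp
  | cons x t ih =>
      rw [List.filterMap_cons, List.filterMap_cons, List.filterMap_cons]
      cases hf : f x with
      | some a =>
          rw [h x (by simp [hf]), Option.some_or]
          simpa using ih.cons a
      | none =>
          cases hg : g x with
          | none => simpa [hf, hg] using ih
          | some b =>
              simp only []
              exact (ih.cons b).trans (List.perm_middle.symm)

-- how pvTupOf changes when one more line is appended
lemma pvTupOf_append (hw : List String) (l : String) (p : Int × String) :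
    pvTupOf ((hw ++ [l]).map PySem.Str.lower) p
    = (pvTupOf (hw.map PySem.Str.lower) p).or
        (if PySem.Str.isIn p.2 (PySem.Str.lower l) && !pvFoundB hw p.2
         then some (((hw.length : Int)), p.1, p.2) else none) := by
  simp only [pvTupOf, pvFirstHit, List.map_append, List.map_cons, List.map_nil]
  rw [PySem.List.enumerate_append, List.find?_append]
  cases hf : (PySem.List.enumerate (hw.map PySem.Str.lower) 0).find?
      (fun q => PySem.Str.isIn p.2 q.2) with
  | some q => rw [Option.some_or, Option.map_some, Option.map_some, Option.some_or]
  | none =>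
      have hnotfound : pvFoundB hw p.2 = false := by
        rw [pvFoundB, ← pvFindEnum_isSome (fun line => PySem.Str.isIn p.2 line) (hw.map PySem.Str.lower) 0, hf]
        rfl
      rw [Option.none_or, Option.map_none, Option.map_none, Option.none_or, hnotfound]
      simp only [Bool.not_false, Bool.and_true]
      rw [PySem.List.enumerate_cons, PySem.List.enumerate_nil, List.find?_cons]
      by_cases hin : PySem.Str.isIn p.2 (PySem.Str.lower l) = true
      · rw [if_pos hin]
        simp only [hin, Option.map_some, List.length_map]
        simp
      · rw [if_neg hin]
        simp only [List.find?_nil]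
        have hc : PySem.Chars.isIn p.2.toList (PySem.Chars.lower l.toList) = false := by
          have h2 : PySem.Str.isIn p.2 (PySem.Str.lower l) = false := by simpa using hin
          rw [PySem.Str.isIn, PySem.Str.toList_lower] at h2
          exact h2
        simp [PySem.Str.isIn, hc]

-- models listed by B (before sorting), read off: the known models that occur somewhere
lemma pvFilterMap_if_snd (cond : String → Bool) (g : Int × String → Int × Int × String)
    (hg : ∀ p, (g p).2.2 = p.2) :
    ∀ (xs : List String) (s : Int),
      ((PySem.List.enumerate xs s).filterMap
          (fun p => if cond p.2 then some (g p) else none)).map (fun t => t.2.2)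
      = xs.filter cond := by
  intro xs
  induction xs with
  | nil => intro s; simp [PySem.List.enumerate_nil]
  | cons x t ih =>
      intro s
      rw [PySem.List.enumerate_cons, List.filterMap_cons, List.filter_cons]
      by_cases h : cond x = true
      · rw [if_pos h, if_pos h, List.map_cons, hg, ih]
      · rw [if_neg h, if_neg h, ih]

lemma pvMap_third (hw : List String) :
    (pvTuples hw).map (fun t => t.2.2) = pvKnownModels.filter (pvFoundB hw) := by
  have : pvTuples hw = (PySem.List.enumerate pvKnownModels 0).filterMap
      (fun p => if pvFoundB hw p.2 then some (((pvFirstHit (hw.map PySem.Str.lower) p.2).getD 0), p.1, p.2) else none) := by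
    unfold pvTuples
    apply List.filterMap_congr
    intro p _
    rw [pvTupOf]
    cases h : pvFirstHit (hw.map PySem.Str.lower) p.2 with
    | some i =>
        have : pvFoundB hw p.2 = true := by rw [pvFoundB, ← pvFirstHit_isSome, h]; rfl
        simp [this]
    | none =>
        have : pvFoundB hw p.2 = false := by rw [pvFoundB, ← pvFirstHit_isSome, h]; rfl
        simp [this]
  rw [this, pvFilterMap_if_snd (pvFoundB hw) _ (fun p => rfl)]

-- the model positions recorded in pvTuples are strictly increasing
lemma pvTuples_pairwise_pos (hw : List String) :
    (pvTuples hw).Pairwise (fun a b => a.2.1 < b.2.1) := by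
  unfold pvTuples
  rw [List.pairwise_filterMap]
  apply (PySem.List.pairwise_lt_enumerate pvKnownModels 0).imp
  intro p q hpq b hb b' hb'
  simp only [pvTupOf] at hb hb'
  cases h : pvFirstHit (hw.map PySem.Str.lower) p.2 <;> rw [h] at hb <;> simp at hb
  cases h' : pvFirstHit (hw.map PySem.Str.lower) q.2 <;> rw [h'] at hb' <;> simp at hb'
  subst hb; subst hb'; simpa using hpq

-- every line index recorded in pvTuples is < hw.length
lemma pvTuples_fst_lt (hw : List String) :
    ∀ t ∈ pvTuples hw, t.1 < (hw.length : Int) := by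
  intro t ht
  unfold pvTuples at ht
  obtain ⟨p, -, hp⟩ := List.mem_filterMap.mp ht
  simp only [pvTupOf] at hp
  cases h : pvFirstHit (hw.map PySem.Str.lower) p.2 <;> rw [h] at hp <;> simp at hp
  obtain ⟨q, hq, hq1⟩ := Option.map_eq_some_iff.mp h
  have hqmem := List.mem_of_find?_eq_some hq
  rw [PySem.List.mem_enumerate_iff] at hqmem
  obtain ⟨k, hk, hqk⟩ := hqmem
  have : t.1 = (k : Int) := by rw [← hp, ← hq1, hqk]; simp
  rw [this]
  simp only [List.length_map] at hk
  exact_mod_cast hk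

-- the sorted tuple list has strictly increasing keys (positions are distinct)
lemma pvSorted_pairwise_lt (hw : List String) :
    (PySem.List.sorted (pvTuples hw) pvKey).Pairwise (fun a b => pvKey a < pvKey b) := by
  have hle := PySem.List.sorted_pairwise (pvTuples hw) pvKey
  have hperm : (PySem.List.sorted (pvTuples hw) pvKey).Perm (pvTuples hw) :=
    PySem.List.sorted_perm _ _ _
  have hne : (PySem.List.sorted (pvTuples hw) pvKey).Pairwise (fun a b => a.2.1 ≠ b.2.1) := by
    refine ((pvTuples_pairwise_pos hw).imp (fun h => ne_of_lt h)).perm hperm.symm ?_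
    intro a b h h'; exact h h'.symm
  refine (hle.and hne).imp ?_
  rintro a b ⟨h1, h2⟩
  refine lt_of_le_of_ne h1 ?_
  intro hk
  apply h2
  have := congrArg (fun x => (ofLex x).2) hk
  simpa [pvKey] using this

lemma pvDetect_append (hw : List String) (l : String) :
    detect_required_models (hw ++ [l])
    = pvKnownModels.foldl (fun found model =>
        if PySem.Str.isIn model (PySem.Str.lower l) && !found.contains model
        then found ++ [model] else found) (detect_required_models hw) := by
  rw [detect_required_models, detect_required_models, List.foldl_append, List.foldl_cons,
    List.foldl_nil]

-- the main invariant: A's result equals B's sorted tuple list, projected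
lemma pvMain : ∀ (hw : List String),
    detect_required_models hw = (PySem.List.sorted (pvTuples hw) pvKey).map (fun t => t.2.2) := by
  intro hw
  induction hw using List.reverseRecOn with
  | nil =>
      have h : pvTuples [] = [] := by
        apply List.filterMap_eq_nil_iff.mpr
        intro p _
        simp [pvTupOf, pvFirstHit, PySem.List.enumerate_nil]
      rw [h]; rfl
  | append_singleton hw l ih =>
      have hnd : pvKnownModels.Nodup := by decide
      -- left side: one more pass of A's outer loop
      rw [pvDetect_append, pvInner (PySem.Str.lower l) pvKnownModels hnd (detect_required_models hw)]
      -- rewrite the membership test through the invariant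
      have hmem : ∀ m ∈ pvKnownModels,
          (detect_required_models hw).contains m = pvFoundB hw m := by
        intro m hmk
        rw [ih]
        have hp : ((PySem.List.sorted (pvTuples hw) pvKey).map (fun t => t.2.2)).Perm
            ((pvTuples hw).map (fun t => t.2.2)) := (PySem.List.sorted_perm _ _ _).map _
        have : m ∈ (PySem.List.sorted (pvTuples hw) pvKey).map (fun t => t.2.2)
             ↔ m ∈ pvKnownModels.filter (pvFoundB hw) := by
          rw [hp.mem_iff, pvMap_third]
        by_cases hf : pvFoundB hw m = true
        · have : m ∈ (PySem.List.sorted (pvTuples hw) pvKey).map (fun t => t.2.2) :=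
            this.mpr (List.mem_filter.mpr ⟨hmk, hf⟩)
          rw [hf]
          simpa using ‹m ∈ List.map (fun t => t.2.2) (PySem.List.sorted (pvTuples hw) pvKey)›
        · have : m ∉ (PySem.List.sorted (pvTuples hw) pvKey).map (fun t => t.2.2) := by
            intro hmm
            exact hf (List.mem_filter.mp (this.mp hmm)).2
          have hf' : pvFoundB hw m = false := by simpa using hf
          rw [hf']
          simp [this]
      have hfilter : pvKnownModels.filter
            (fun m => PySem.Str.isIn m (PySem.Str.lower l) && !(detect_required_models hw).contains m)
          = pvKnownModels.filter
            (fun m => PySem.Str.isIn m (PySem.Str.lower l) && !pvFoundB hw m) := by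
        apply List.filter_congr
        intro m hm
        rw [hmem m hm]
      rw [hfilter, ih]
      -- right side: the new tuples appended after the old sorted ones
      set g : Int × String → Option (Int × Int × String) := fun p =>
        if PySem.Str.isIn p.2 (PySem.Str.lower l) && !pvFoundB hw p.2
        then some (((hw.length : Int)), p.1, p.2) else none with hg
      set newT : List (Int × Int × String) := (PySem.List.enumerate pvKnownModels 0).filterMap g with hnewT
      have hdecomp : (pvTuples (hw ++ [l])).Perm (pvTuples hw ++ newT) := by
        have : pvTuples (hw ++ [l]) = (PySem.List.enumerate pvKnownModels 0).filterMap
            (fun p => (pvTupOf (hw.map PySem.Str.lower) p).or (g p)) := by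
          unfold pvTuples
          apply List.filterMap_congr
          intro p _
          rw [pvTupOf_append]
        rw [this]
        exact pvFilterMap_or_perm _ g (by
          intro p hp
          have : pvFoundB hw p.2 = true := by
            rw [pvFoundB, ← pvFirstHit_isSome]
            simp only [pvTupOf, Option.isSome_map] at hp
            exact hp
          simp [hg, this]) _
      have hsorted_eq : PySem.List.sorted (pvTuples (hw ++ [l])) pvKey
          = PySem.List.sorted (pvTuples hw) pvKey ++ newT := by
        apply PySem.List.sorted_eq_of_perm_of_pairwise_lt
        · exact ((PySem.List.sorted_perm _ _ _).append_right newT).trans hdecomp.symm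
        · rw [List.pairwise_append]
          refine ⟨pvSorted_pairwise_lt hw, ?_, ?_⟩
          · rw [hnewT, List.pairwise_filterMap]
            apply (PySem.List.pairwise_lt_enumerate pvKnownModels 0).imp
            intro p q hpq b hb b' hb'
            simp only [hg] at hb hb'
            rw [Option.ite_none_right_eq_some, Option.some_inj] at hb hb'
            obtain ⟨-, hb⟩ := hb
            obtain ⟨-, hb'⟩ := hb'
            subst hb; subst hb'
            rw [pvKey, pvKey, Prod.Lex.toLex_lt_toLex]
            right; exact ⟨rfl, hpq⟩
          · intro a ha b hb
            have ha' : a ∈ pvTuples hw := (PySem.List.sorted_perm _ _ _).mem_iff.mp ha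
            have halt : a.1 < (hw.length : Int) := pvTuples_fst_lt hw a ha'
            have hb1 : b.1 = (hw.length : Int) := by
              rw [hnewT] at hb
              obtain ⟨p, -, hp⟩ := List.mem_filterMap.mp hb
              simp only [hg] at hp
              rw [Option.ite_none_right_eq_some, Option.some_inj] at hp
              obtain ⟨-, hp⟩ := hp
              rw [← hp]
            rw [pvKey, pvKey, Prod.Lex.toLex_lt_toLex]
            left; rw [hb1]; exact halt
      rw [hsorted_eq, List.map_append]
      congr 1
      -- map the new tuples back to the filtered model list
      rw [hnewT, hg]
      exact (pvFilterMap_if_snd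
        (fun m => PySem.Str.isIn m (PySem.Str.lower l) && !pvFoundB hw m)
        (fun p => (((hw.length : Int)), p.1, p.2)) (fun p => rfl) pvKnownModels 0).symm

-- ===== VERDICT (by name: the statement is the Claim_ definition above) =====
theorem detect_required_models_spec : Claim_equal_detect_required_models := by
  intro hw _
  show detect_required_models hw = detect_required_models_alt hw
  rw [detect_required_models_alt]
  rw [pvAltHits (hw.map PySem.Str.lower) (PySem.List.enumerate pvKnownModels 0) []]
  rw [List.nil_append, pvSorted2_eq_sorted]
  exact pvMain hw
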